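-- pv_equiv track=rewrite | github.com/JalonJia/PythonStudy | src/Jalon/Gobang/main.py | five_flags_inline
-- ===== SOURCE A (Python) =====
-- def five_flags_inline(flags, index):
--     delta_x = 31
--     delta_y = 31
--     flags_next_four = flags[index+1:index+5]
--     if len(flags_next_four) < 4:
--         return False
--
--     last_x = flags[index][0]
--     last_y = flags[index][1]
--
--     x_add = 0
--     y_add = 0
--
--     #赢棋只可能是以下四种情况
--     if flags_next_four[0][0] == last_x: #判断向下纵列
--         x_add = 0
--         y_add = delta_y
--     elif flags_next_four[0][1] == last_y: #判断向右横列
--         x_add = delta_x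
--         y_add = 0
--     elif (flags_next_four[0][0] == last_x + delta_x) and (flags_next_four[0][1] == last_y - delta_y): #判断右上斜线/
--         x_add = delta_x
--         y_add = -delta_y
--     elif (flags_next_four[0][0] == last_x + delta_x) and (flags_next_four[0][1] == last_y + delta_y): #判断右下斜线\
--         x_add = delta_x
--         y_add = delta_y
--     else : #肯定没有赢
--         return False
--
--     for f in flags_next_four:
--         last_x += x_add
--         last_y += y_add
--         if (last_x != f[0]) or (last_y != f[1]):
--             return False
--
--     return True
-- ===== SOURCE B (Python) =====
-- def five_flags_inline(flags, index):
--     window = flags[index + 1:index + 5]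
--     if len(window) < 4:
--         return False
--     x0, y0 = flags[index]
--     return any(window == [(x0 + k * dx, y0 + k * dy) for k in range(1, 5)]
--                for dx, dy in ((0, 31), (31, 0), (31, -31), (31, 31)))
-- ===== Notes on version B (the rewrite author's own statement) =====
-- stated objective: alternative
-- what changed: Instead of inferring one step vector from the first delta and verifying it with a stateful walk, B generates the full expected five-in-a-row line for each of the four candidate directions and compares the whole window against each generated list.
import Mathlib
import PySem

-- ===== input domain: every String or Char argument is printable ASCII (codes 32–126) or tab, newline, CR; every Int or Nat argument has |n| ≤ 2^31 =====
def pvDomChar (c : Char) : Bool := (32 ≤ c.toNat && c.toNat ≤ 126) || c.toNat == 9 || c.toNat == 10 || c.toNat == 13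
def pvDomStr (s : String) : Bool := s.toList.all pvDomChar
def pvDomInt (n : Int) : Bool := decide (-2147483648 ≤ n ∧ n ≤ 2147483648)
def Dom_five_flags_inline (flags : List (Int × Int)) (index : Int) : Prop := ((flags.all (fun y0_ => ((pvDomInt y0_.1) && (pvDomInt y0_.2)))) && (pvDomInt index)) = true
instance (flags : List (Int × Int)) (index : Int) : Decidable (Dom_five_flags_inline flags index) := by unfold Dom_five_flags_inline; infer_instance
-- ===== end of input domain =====

-- B replaces A's infer-then-verify walk by generate-and-compare: for each of the four legal
-- directions it builds the expected five-in-a-row line and compares the window to it (objective: alternative).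

-- ===== PORT A =====
-- the for-loop over flags_next_four, carrying (last_x, last_y) and the fixed (x_add, y_add)
def fiveLoopA : List (Int × Int) → Int → Int → Int → Int → Bool
  | [], _, _, _, _ => true
  | f :: rest, lx, ly, xa, ya =>
    let lx' := lx + xa
    let ly' := ly + ya
    if lx' ≠ f.1 ∨ ly' ≠ f.2 then false else fiveLoopA rest lx' ly' xa ya

def five_flags_inline (flags : List (Int × Int)) (index : Int) : Bool :=
  let flags_next_four := PySem.List.slice flags (some (index + 1)) (some (index + 5))
  if flags_next_four.length < 4 then false
  else
    match PySem.List.pyGet? flags index with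
    | none => false   -- Python raises IndexError here; excluded by Pre_
    | some p =>
      match flags_next_four with
      | [] => false   -- unreachable: length ≥ 4
      | f0 :: _ =>
        if f0.1 = p.1 then fiveLoopA flags_next_four p.1 p.2 0 31
        else if f0.2 = p.2 then fiveLoopA flags_next_four p.1 p.2 31 0
        else if f0.1 = p.1 + 31 ∧ f0.2 = p.2 - 31 then fiveLoopA flags_next_four p.1 p.2 31 (-31)
        else if f0.1 = p.1 + 31 ∧ f0.2 = p.2 + 31 then fiveLoopA flags_next_four p.1 p.2 31 31
        else false

-- ===== PORT B =====
-- the inner list comprehension: the expected line [(x0 + k*dx, y0 + k*dy) for k in range(1, 5)]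
def expectedLine (x0 y0 dx dy : Int) : List (Int × Int) :=
  (PySem.List.pyRange 1 5 1).map (fun k => (x0 + k * dx, y0 + k * dy))

def five_flags_inline_alt (flags : List (Int × Int)) (index : Int) : Bool :=
  let window := PySem.List.slice flags (some (index + 1)) (some (index + 5))
  if window.length < 4 then false
  else
    match PySem.List.pyGet? flags index with
    | none => false   -- Python raises IndexError here; excluded by Pre_
    | some p =>
      ([((0:Int), (31:Int)), (31, 0), (31, -31), (31, 31)]).any
        (fun d => window == expectedLine p.1 p.2 d.1 d.2)

-- ===== PRECONDITION & SPEC =====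
-- Pre_ excludes exactly the inputs where the Python A raises IndexError
-- (index = -len(flags)-1 with len(flags) ≥ 5: the slice has 4 elements but flags[index] is out of range);
-- B raises identically there, and the ports return false.
def Pre_five_flags_inline (flags : List (Int × Int)) (index : Int) : Prop :=
  ¬ (index = -(flags.length : Int) - 1 ∧ 5 ≤ flags.length)
instance (flags : List (Int × Int)) (index : Int) : Decidable (Pre_five_flags_inline flags index) := by
  unfold Pre_five_flags_inline; infer_instance

def pvWitness_five_flags_inline : (List (Int × Int)) × Int :=
  ([(0, 0), (0, 31), (0, 62), (0, 93), (0, 124)], 0)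

def Spec_five_flags_inline (flags : List (Int × Int)) (index : Int) (out : Bool) : Prop := out = five_flags_inline_alt flags index
instance (flags : List (Int × Int)) (index : Int) (out : Bool) : Decidable (Spec_five_flags_inline flags index out) := by unfold Spec_five_flags_inline; infer_instance

-- ===== CLAIM (what is proved, stated in full; the proofs are below) =====
def Claim_equal_five_flags_inline : Prop := ∀ (flags : List (Int × Int)) (index : Int), Dom_five_flags_inline flags index → Pre_five_flags_inline flags index → Spec_five_flags_inline flags index (five_flags_inline flags index)

-- ===== LEMMAS AND PROOFS =====

-- the slice xs[i+1:i+5] never has more than 4 elements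
theorem slice_len_le (xs : List (Int × Int)) (i : Int) :
    (PySem.List.slice xs (some (i + 1)) (some (i + 5))).length ≤ 4 := by
  simp [PySem.List.slice, PySem.List.clampIdx]
  split_ifs <;> omega

-- the comprehension, written out for k = 1..4
theorem expectedLine_eq (x0 y0 dx dy : Int) :
    expectedLine x0 y0 dx dy =
      [(x0 + 1 * dx, y0 + 1 * dy), (x0 + 2 * dx, y0 + 2 * dy),
       (x0 + 3 * dx, y0 + 3 * dy), (x0 + 4 * dx, y0 + 4 * dy)] := rfl

-- A's cumulative walk over a 4-element window is list equality with the expected line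
theorem loopA_eq (w1 w2 w3 w4 : Int × Int) (x0 y0 dx dy : Int) :
    fiveLoopA [w1, w2, w3, w4] x0 y0 dx dy
      = ([w1, w2, w3, w4] == expectedLine x0 y0 dx dy) := by
  obtain ⟨a1, b1⟩ := w1; obtain ⟨a2, b2⟩ := w2; obtain ⟨a3, b3⟩ := w3; obtain ⟨a4, b4⟩ := w4
  rw [Bool.eq_iff_iff]
  simp only [fiveLoopA, expectedLine_eq, beq_iff_eq, List.cons.injEq, Prod.mk.injEq, and_true]
  split_ifs <;> simp_all <;> omega

-- ===== VERDICT (by name: the statement is the Claim_ definition above) =====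
theorem five_flags_inline_spec : Claim_equal_five_flags_inline := by
  intro flags index _dom _pre
  unfold Spec_five_flags_inline five_flags_inline five_flags_inline_alt
  have hle := slice_len_le flags index
  generalize hw : PySem.List.slice flags (some (index + 1)) (some (index + 5)) = w
  rw [hw] at hle
  rcases w with _ | ⟨w1, _ | ⟨w2, _ | ⟨w3, _ | ⟨w4, _ | ⟨w5, rest⟩⟩⟩⟩⟩
  · rfl
  · rfl
  · rfl
  · rfl
  · simp only [List.length_cons, List.length_nil]
    cases hp : PySem.List.pyGet? flags index with
    | none => simp
    | some p =>
      obtain ⟨px, py⟩ := p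
      obtain ⟨a1, b1⟩ := w1; obtain ⟨a2, b2⟩ := w2
      obtain ⟨a3, b3⟩ := w3; obtain ⟨a4, b4⟩ := w4
      rw [Bool.eq_iff_iff]
      simp only [List.any_cons, List.any_nil, Bool.or_false, Bool.or_eq_true,
        loopA_eq, beq_iff_eq, expectedLine_eq, List.cons.injEq, Prod.mk.injEq,
        show ¬ (3 + 1 < 4) from by omega, if_false, and_true]
      split_ifs <;> simp_all <;> omega
  · simp at hle; omega
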